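-- pv_equiv track=rewrite | github.com/pypi-data/pypi-mirror-40 | packages/minibuild/minibuild-1.0.9.tar.gz/minibuild-1.0.9/minibuild/toolset_msvs.py | rc_tool_output_filter
-- ===== SOURCE A (Python) =====
-- def rc_tool_output_filter(stdout_data, return_code):
--     output = []
--     idx = 0
--     for line in stdout_data.splitlines():
--         line = line.rstrip('\r\n').strip()
--         if not line:
--             continue
--         idx += 1
--         if idx == 1 or idx == 2:
--             if 'Microsoft' in line:
--                 continue
--         output.append(line)
--     return None, '\n'.join(output)
-- ===== SOURCE B (Python) =====
-- def rc_tool_output_filter(stdout_data, return_code):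
--     lines = stdout_data.splitlines()
--     # Phase 1: bounded scan of the header zone - consume lines until two
--     # non-empty ones have been seen, dropping Microsoft banner lines there.
--     out = []
--     i, slots = 0, 2
--     while i < len(lines) and slots:
--         s = lines[i].strip()
--         i += 1
--         if not s:
--             continue
--         slots -= 1
--         if 'Microsoft' not in s:
--             out.append(s)
--     # Phase 2: everything after the header zone is kept unconditionally.
--     out.extend(s for s in (l.strip() for l in lines[i:]) if s)
--     return None, '\n'.join(out)
-- ===== Notes on version B (the rewrite author's own statement) =====
-- stated objective: alternative
-- what changed: Replaces A's single pass with a running non-empty counter and an in-loop header test by a two-phase algorithm: a bounded header scan that consumes lines only until two non-empty ones were seen (testing 'Microsoft' only there), then a bulk pass over the remaining lines that keeps every non-empty stripped line unconditionally.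
import Mathlib
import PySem

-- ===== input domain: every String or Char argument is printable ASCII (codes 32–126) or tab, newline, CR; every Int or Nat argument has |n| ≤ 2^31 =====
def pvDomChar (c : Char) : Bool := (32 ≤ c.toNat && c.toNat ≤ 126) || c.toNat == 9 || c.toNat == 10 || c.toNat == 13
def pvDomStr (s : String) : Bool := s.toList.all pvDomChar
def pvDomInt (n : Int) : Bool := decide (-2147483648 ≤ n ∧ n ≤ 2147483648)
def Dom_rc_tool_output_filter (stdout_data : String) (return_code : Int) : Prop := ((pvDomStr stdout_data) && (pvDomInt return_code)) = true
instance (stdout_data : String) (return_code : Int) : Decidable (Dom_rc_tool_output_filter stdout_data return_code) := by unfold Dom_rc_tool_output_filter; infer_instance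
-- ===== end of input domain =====

-- B replaces A's single counting pass by a two-phase algorithm (bounded header scan, then an
-- unconditional bulk pass over the remaining lines); objective: alternative.

-- ===== PORT A =====
-- line.rstrip('\r\n'): ported by hand (drop trailing '\r'/'\n' chars); exact, PySem has no rstrip-with-chars primitive
def pyRstripCRLF (s : String) : String :=
  String.ofList ((s.toList.reverse.dropWhile (fun c => c == '\r' || c == '\n')).reverse)

-- the loop body of A, factored out so the invariant lemmas can name it
def pvStepA (st : List String × Int) (l : String) : List String × Int :=
  let line := PySem.Str.strip (pyRstripCRLF l)
  if line = "" then st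
  else
    let idx := st.2 + 1
    if (idx == 1 || idx == 2) && PySem.Str.isIn "Microsoft" line then (st.1, idx)
    else (st.1 ++ [line], idx)

def rc_tool_output_filter (stdout_data : String) (return_code : Int) : Option String × String :=
  let r := (PySem.Str.splitlines stdout_data).foldl pvStepA ([], 0)
  (none, PySem.Str.join "\n" r.1)

-- ===== PORT B =====
-- Phase 1 of Source B: the while loop over indices i with header `slots`; the structural recursion
-- consumes the list instead of advancing i and returns the kept header lines together with
-- the untouched suffix lines[i:].
def pvHeader (lines : List String) (slots : Int) : List String × List String :=
  match lines with
  | [] => ([], [])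
  | l :: rest =>
    if slots = 0 then ([], l :: rest)
    else
      let s := PySem.Str.strip l
      if s = "" then pvHeader rest slots
      else if PySem.Str.isIn "Microsoft" s then pvHeader rest (slots - 1)
      else
        let r := pvHeader rest (slots - 1)
        (s :: r.1, r.2)

def rc_tool_output_filter_alt (stdout_data : String) (return_code : Int) : Option String × String :=
  let lines := PySem.Str.splitlines stdout_data
  let r := pvHeader lines 2
  -- Phase 2 of Source B: keep every non-empty stripped line of the remainder unconditionally
  let out := r.1 ++ ((r.2.map PySem.Str.strip).filter (fun s => s ≠ ""))
  (none, PySem.Str.join "\n" out)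

-- ===== PRECONDITION & SPEC =====
def Spec_rc_tool_output_filter (stdout_data : String) (return_code : Int) (out : Option String × String) : Prop := out = rc_tool_output_filter_alt stdout_data return_code
instance (stdout_data : String) (return_code : Int) (out : Option String × String) : Decidable (Spec_rc_tool_output_filter stdout_data return_code out) := by unfold Spec_rc_tool_output_filter; infer_instance

-- ===== CLAIM (what is proved, stated in full; the proofs are below) =====
def Claim_equal_rc_tool_output_filter : Prop := ∀ (stdout_data : String) (return_code : Int), Dom_rc_tool_output_filter stdout_data return_code → Spec_rc_tool_output_filter stdout_data return_code (rc_tool_output_filter stdout_data return_code)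

-- ===== LEMMAS AND PROOFS =====

-- rstrip('\r\n') before strip() is a no-op: strip removes trailing whitespace anyway
theorem dropWhile_of_all {α : Type} (p : α → Bool) (t l : List α) (h : ∀ c ∈ t, p c = true) :
    List.dropWhile p (t ++ l) = List.dropWhile p l := by
  rw [List.dropWhile_append]
  simp [List.dropWhile_eq_nil_iff.mpr h]

theorem rstrip_append_ws (s t : List Char) (h : ∀ c ∈ t, PySem.Chars.isspace c = true) :
    PySem.Chars.rstrip (s ++ t) = PySem.Chars.rstrip s := by
  unfold PySem.Chars.rstrip
  rw [List.reverse_append, dropWhile_of_all _ _ _ (by intro c hc; exact h c (List.mem_reverse.mp hc))]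

theorem strip_append_ws (s t : List Char) (h : ∀ c ∈ t, PySem.Chars.isspace c = true) :
    PySem.Chars.strip (s ++ t) = PySem.Chars.strip s := by
  unfold PySem.Chars.strip PySem.Chars.lstrip
  rw [List.dropWhile_append]
  by_cases he : (List.dropWhile PySem.Chars.isspace s).isEmpty = true
  · simp only [he]
    rw [List.dropWhile_eq_nil_iff.mpr h]
    rw [List.isEmpty_iff] at he
    rw [he]
    simp
  · simp only [he]
    exact rstrip_append_ws _ _ h

theorem strip_rstripCRLF (s : String) : PySem.Str.strip (pyRstripCRLF s) = PySem.Str.strip s := by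
  apply String.toList_inj.mp
  rw [PySem.Str.toList_strip, PySem.Str.toList_strip]
  unfold pyRstripCRLF
  simp only [String.toList_ofList]
  have hdecomp : s.toList = (s.toList.reverse.dropWhile (fun c => c == '\r' || c == '\n')).reverse
      ++ (s.toList.reverse.takeWhile (fun c => c == '\r' || c == '\n')).reverse := by
    rw [← List.reverse_append, List.takeWhile_append_dropWhile, List.reverse_reverse]
  conv_rhs => rw [hdecomp]
  rw [strip_append_ws]
  intro c hc
  have := List.mem_takeWhile_imp (List.mem_reverse.mp hc)
  rcases Bool.or_eq_true_iff.mp this with h | h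
  · rw [beq_iff_eq.mp h]; decide
  · rw [beq_iff_eq.mp h]; decide

-- phase-2 list, named for the lemmas
def pvCleaned (ls : List String) : List String :=
  (ls.map PySem.Str.strip).filter (fun s => s ≠ "")

-- once A's counter has reached 2, its loop keeps every non-empty stripped line
theorem foldA_tail (ls : List String) (out : List String) (i : Int) (h : 2 ≤ i) :
    ls.foldl pvStepA (out, i) = (out ++ pvCleaned ls, i + (pvCleaned ls).length) := by
  induction ls generalizing out i with
  | nil => simp [pvCleaned]
  | cons l rest ih =>
    rw [List.foldl_cons]
    by_cases he : PySem.Str.strip l = ""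
    · have hf : pvStepA (out, i) l = (out, i) := by
        unfold pvStepA; simp [strip_rstripCRLF, he]
      rw [hf, ih _ _ h]
      simp [pvCleaned, he]
    · have h1 : ¬(i + 1 = 1) := by omega
      have h2 : ¬(i + 1 = 2) := by omega
      have hf : pvStepA (out, i) l = (out ++ [PySem.Str.strip l], i + 1) := by
        unfold pvStepA
        rw [strip_rstripCRLF, if_neg he]
        simp [h1, h2]
      rw [hf, ih _ _ (by omega)]
      simp only [pvCleaned, List.map_cons, List.filter_cons, he, ne_eq, not_false_iff,
        decide_true, if_true, List.length_cons, Prod.mk.injEq]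
      constructor
      · simp
      · push_cast; omega

-- while A's counter is below 2 (slots = 2 - counter header slots remain), A's loop computes
-- B's header phase followed by B's bulk phase on the remainder
theorem foldA_head (ls : List String) (out : List String) (slots : Int)
    (h0 : 0 < slots) (h2 : slots ≤ 2) :
    (ls.foldl pvStepA (out, 2 - slots)).1
      = out ++ (pvHeader ls slots).1 ++ pvCleaned (pvHeader ls slots).2 := by
  induction ls generalizing out slots with
  | nil => simp [pvHeader, pvCleaned]
  | cons l rest ih =>
    rw [List.foldl_cons]
    have hsne : ¬ slots = 0 := by omega
    by_cases he : PySem.Str.strip l = ""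
    · have hf : pvStepA (out, 2 - slots) l = (out, 2 - slots) := by
        unfold pvStepA; simp [strip_rstripCRLF, he]
      rw [hf, ih _ _ h0 h2]
      simp [pvHeader, hsne, he]
    · have hidx : ((2 - slots + 1 == 1 || 2 - slots + 1 == 2) : Bool) = true := by
        have : slots = 1 ∨ slots = 2 := by omega
        rcases this with rfl | rfl <;> decide
      by_cases hm : PySem.Str.isIn "Microsoft" (PySem.Str.strip l) = true
      · have hm' : PySem.Chars.isIn ['M','i','c','r','o','s','o','f','t'] (PySem.Chars.strip l.toList) = true := by
          simpa [PySem.Str.isIn, PySem.Str.toList_strip] using hm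
        have hf : pvStepA (out, 2 - slots) l = (out, 2 - slots + 1) := by
          unfold pvStepA
          rw [strip_rstripCRLF, if_neg he]
          simp [hidx, hm']
        have hh : pvHeader (l :: rest) slots = pvHeader rest (slots - 1) := by
          simp [pvHeader, hsne, he, hm']
        rw [hf, hh]
        by_cases h1 : slots = 1
        · subst h1
          have hr : pvHeader rest ((1 : Int) - 1) = ([], rest) := by
            cases rest <;> simp [pvHeader]
          rw [hr]
          have ht := foldA_tail rest out 2 (le_refl 2)
          simp only [show (2 : Int) - 1 + 1 = 2 by norm_num, ht]
          simp
        · have : 2 - slots + 1 = 2 - (slots - 1) := by omega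
          rw [this, ih _ _ (by omega) (by omega)]
      · have hm' : PySem.Chars.isIn ['M','i','c','r','o','s','o','f','t'] (PySem.Chars.strip l.toList) = false := by
          simpa [PySem.Str.isIn, PySem.Str.toList_strip] using hm
        have hf : pvStepA (out, 2 - slots) l = (out ++ [PySem.Str.strip l], 2 - slots + 1) := by
          unfold pvStepA
          rw [strip_rstripCRLF, if_neg he]
          simp [hidx, hm']
        have hh : pvHeader (l :: rest) slots
            = (PySem.Str.strip l :: (pvHeader rest (slots - 1)).1, (pvHeader rest (slots - 1)).2) := by
          simp [pvHeader, hsne, he, hm']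
        rw [hf, hh]
        by_cases h1 : slots = 1
        · subst h1
          have hr : pvHeader rest ((1 : Int) - 1) = ([], rest) := by
            cases rest <;> simp [pvHeader]
          rw [hr]
          have ht := foldA_tail rest (out ++ [PySem.Str.strip l]) 2 (le_refl 2)
          simp only [show (2 : Int) - 1 + 1 = 2 by norm_num, ht]
        · have heq : 2 - slots + 1 = 2 - (slots - 1) := by omega
          rw [heq]
          rw [ih _ _ (by omega) (by omega)]
          simp

-- ===== VERDICT (by name: the statement is the Claim_ definition above) =====
theorem rc_tool_output_filter_spec : Claim_equal_rc_tool_output_filter := by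
  intro stdout_data return_code _
  unfold Spec_rc_tool_output_filter rc_tool_output_filter rc_tool_output_filter_alt
  have := foldA_head (PySem.Str.splitlines stdout_data) [] 2 (by norm_num) (le_refl 2)
  simp only [show (2 : Int) - 2 = 0 by norm_num] at this
  simp [this, pvCleaned]
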